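-- pv_equiv track=rewrite | github.com/pinobatch/pently | tools/pentlyas.py | subseq_pack
-- ===== SOURCE A (Python) =====
-- def subseq_pack(subseqs):
--     # out_seqs is a list of tuples of the form (index into subseqs,
--     # sequence data).  We want to find the LONGEST sequence that
--     # contains each.
--     inclen_seqs = sorted(enumerate(subseqs), key=lambda x: len(x[1]))
--
--     def handle_one_seq(inclen_seqs, i):
--         subseq = inclen_seqs[i][1]
--         for candidate in range(len(inclen_seqs) - 1, i, -1):
--             ckey, longerdata = inclen_seqs[candidate]
--             for startidx in range(0, len(longerdata) - len(subseq) + 1):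
--                 if (subseq[0] == longerdata[startidx]
--                     and subseq == longerdata[startidx:startidx + len(subseq)]):
--                     return ckey, startidx, startidx + len(subseq)
--         return None
--
--     out_seqs = [None] * len(inclen_seqs)
--
--     # Each element out_seqs[i] is either a tuple
--     # (index of longer sequence in subseqs, slice start, slice end)
--     # if a match for subseqs[i] is found among longer sequences,
--     # or None otherwise.
--     for i in range(len(inclen_seqs)):
--         key = inclen_seqs[i][0]
--         out_seqs[key] = handle_one_seq(inclen_seqs, i)
--     return out_seqs
-- ===== SOURCE B (Python) =====
-- def subseq_pack(subseqs):
--     # Single pass per sequence: no sorting; for each sequence pick, among all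
--     # sequences that come strictly later in (length, index) lexicographic order
--     # and contain it contiguously, the one with the greatest (length, index),
--     # and report the leftmost occurrence inside it.
--     def find_sub(hay, needle):
--         m = len(needle)
--         for k in range(len(hay) - m + 1):
--             if hay[k:k + m] == needle:
--                 return k
--         return None
--
--     out = []
--     for i, s in enumerate(subseqs):
--         best = None  # (container length, container index, match start)
--         for j, t in enumerate(subseqs):
--             if (len(t), j) <= (len(s), i):
--                 continue
--             if best is not None and (len(t), j) < (best[0], best[1]):
--                 continue
--             k = find_sub(t, s)
--             if k is not None:
--                 best = (len(t), j, k)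
--         out.append((best[1], best[2], best[2] + len(s)) if best is not None else None)
--     return out
-- ===== Notes on version B (the rewrite author's own statement) =====
-- stated objective: alternative
-- what changed: B drops A's stable sort and backward scan over the sorted list: for each sequence it makes one direct pass over the input keeping the (length, index)-lexicographically greatest container found so far, skipping candidates that cannot beat the current best.
import Mathlib
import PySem

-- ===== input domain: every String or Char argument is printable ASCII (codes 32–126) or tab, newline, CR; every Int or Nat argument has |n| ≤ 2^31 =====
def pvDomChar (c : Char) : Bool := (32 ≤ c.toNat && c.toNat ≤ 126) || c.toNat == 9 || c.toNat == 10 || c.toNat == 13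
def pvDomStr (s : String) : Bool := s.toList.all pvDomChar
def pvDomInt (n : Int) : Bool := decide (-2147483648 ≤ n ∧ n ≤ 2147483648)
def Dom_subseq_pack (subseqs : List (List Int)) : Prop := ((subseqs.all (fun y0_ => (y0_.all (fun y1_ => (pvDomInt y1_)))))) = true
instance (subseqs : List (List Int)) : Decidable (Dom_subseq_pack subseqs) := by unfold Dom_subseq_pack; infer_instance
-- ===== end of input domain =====

-- B replaces A's sort-then-backward-scan by a direct single pass per sequence that
-- keeps the (length, index)-maximal container seen so far (objective: alternative).

-- ===== PORT A =====
-- handle_one_seq: scan candidates from the longest end of the sorted list down to i+1,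
-- inner scan over start positions; early return ported as findSome?.
def spHandleOne (inclen : List (Int × List Int)) (i : Nat) : Option (List Int) :=
  let subseq := (PySem.List.pyGetD inclen (i : Int) (0, [])).2   -- index always in range
  (((List.range inclen.length).drop (i + 1)).reverse).findSome? (fun (c : Nat) =>
    let p := PySem.List.pyGetD inclen (c : Int) (0, [])          -- index always in range
    (PySem.List.pyRange 0 ((p.2.length : Int) - (subseq.length : Int) + 1) 1).findSome? (fun st =>
      if PySem.List.pyGet? subseq 0 = PySem.List.pyGet? p.2 st ∧
         subseq = PySem.List.slice p.2 (some st) (some (st + (subseq.length : Int))) then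
        some [p.1, st, st + (subseq.length : Int)]
      else none))

def subseq_pack (subseqs : List (List Int)) : List (Option (List Int)) :=
  let inclen := PySem.List.sorted (PySem.List.enumerate subseqs) (fun x => x.2.length)
  (List.range inclen.length).foldl
    (fun out (i : Nat) =>
      out.set ((PySem.List.pyGetD inclen (i : Int) (0, [])).1).toNat (spHandleOne inclen i))
    (List.replicate inclen.length none)

-- ===== PORT B =====
-- find_sub: leftmost contiguous occurrence of needle in hay.
def spFindSub (t s : List Int) : Option Int :=
  (PySem.List.pyRange 0 ((t.length : Int) - (s.length : Int) + 1) 1).findSome? (fun k =>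
    if PySem.List.slice t (some k) (some (k + (s.length : Int))) = s then some k else none)

-- one step of B's inner loop: keep the (length, index)-greatest container found so far
-- (len, j) < (bl, bj): the current best is a strictly later container
def spWorse (best : Option (Int × Int × Int)) (len j : Int) : Bool :=
  match best with
  | some (bl, bj, _) => decide (len < bl ∨ (len = bl ∧ j < bj))
  | none => false

def spStep (i : Int) (s : List Int) (best : Option (Int × Int × Int)) (p : Int × List Int) :
    Option (Int × Int × Int) :=
  if (p.2.length : Int) < (s.length : Int) ∨ ((p.2.length : Int) = (s.length : Int) ∧ p.1 ≤ i) then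
    best
  else if spWorse best (p.2.length : Int) p.1 then
    best
  else
    match spFindSub p.2 s with
    | some k => some ((p.2.length : Int), p.1, k)
    | none => best

def subseq_pack_alt (subseqs : List (List Int)) : List (Option (List Int)) :=
  (PySem.List.enumerate subseqs).map (fun q =>
    match (PySem.List.enumerate subseqs).foldl (spStep q.1 q.2) none with
    | some (_, bj, k) => some [bj, k, k + (q.2.length : Int)]
    | none => none)

-- ===== PRECONDITION & SPEC =====
-- Pre_ excludes inputs where A raises IndexError: an empty subsequence together with at
-- least one other sequence makes A evaluate subseq[0] on the empty list.
def Pre_subseq_pack (subseqs : List (List Int)) : Prop :=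
  [] ∈ subseqs → subseqs.length ≤ 1
instance (subseqs : List (List Int)) : Decidable (Pre_subseq_pack subseqs) := by
  unfold Pre_subseq_pack; infer_instance
def pvWitness_subseq_pack : List (List Int) := [[1, 2], [0, 1, 2, 3]]

def Spec_subseq_pack (subseqs : List (List Int)) (out : List (Option (List Int))) : Prop :=
  out = subseq_pack_alt subseqs
instance (subseqs : List (List Int)) (out : List (Option (List Int))) :
    Decidable (Spec_subseq_pack subseqs out) := by unfold Spec_subseq_pack; infer_instance

-- ===== CLAIM (what is proved, stated in full; the proofs are below) =====
def Claim_equal_subseq_pack : Prop :=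
  ∀ (subseqs : List (List Int)), Dom_subseq_pack subseqs → Pre_subseq_pack subseqs →
    Spec_subseq_pack subseqs (subseq_pack subseqs)
-- ===== LEMMAS AND PROOFS =====

-- the lexicographic (length, index) key that drives both algorithms
def spKV (p : Int × List Int) : Int × Int := ((p.2.length : Int), p.1)
def spKLt (a b : Int × Int) : Prop := a.1 < b.1 ∨ (a.1 = b.1 ∧ a.2 < b.2)

theorem spKLt_trans {a b c : Int × Int} (h1 : spKLt a b) (h2 : spKLt b c) : spKLt a c := by
  unfold spKLt at *; omega

theorem spKLt_asymm {a b : Int × Int} (h1 : spKLt a b) (h2 : spKLt b a) : False := by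
  unfold spKLt at *; omega


theorem spKLt_total {a b : Int × Int} (h : a ≠ b) : spKLt a b ∨ spKLt b a := by
  rcases a with ⟨a1, a2⟩; rcases b with ⟨b1, b2⟩
  unfold spKLt
  by_cases h1 : a1 = b1
  · subst h1
    have h2 : a2 ≠ b2 := fun hh => h (by rw [hh])
    omega
  · omega

-- pointwise congruence for findSome?
theorem spFindSome_congr {α β : Type} (l : List α) (f g : α → Option β)
    (h : ∀ x ∈ l, f x = g x) : l.findSome? f = l.findSome? g := by
  induction l with
  | nil => rfl
  | cons x xs ih =>
    simp only [List.findSome?_cons, h x (List.mem_cons_self), ih (fun y hy => h y (List.mem_cons_of_mem _ hy))]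

-- findSome? of a value-mapped function
theorem spFindSome_map {α β γ : Type} (l : List α) (f : α → Option β) (h : β → γ) :
    l.findSome? (fun x => (f x).map h) = (l.findSome? f).map h := by
  induction l with
  | nil => rfl
  | cons x xs ih =>
    simp only [List.findSome?_cons]
    cases hf : f x with
    | none => simp [ih]
    | some b => simp

-- ---- stability of A's sort: the sorted list is strictly increasing in (length, index) ----

theorem spInsertBy_pairwise (x : Int × List Int) (ys : List (Int × List Int))
    (hp : ys.Pairwise (fun a b => spKLt (spKV a) (spKV b)))
    (hidx : ∀ y ∈ ys, y.1 < x.1) :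
    (PySem.List.insertBy (fun a b => decide (a.2.length < b.2.length)) x ys).Pairwise
      (fun a b => spKLt (spKV a) (spKV b)) := by
  induction ys with
  | nil => simp [PySem.List.insertBy]
  | cons y ys ih =>
    simp only [PySem.List.insertBy]
    rcases List.pairwise_cons.mp hp with ⟨hy, hys⟩
    split
    · rename_i hb
      rw [decide_eq_true_iff] at hb
      refine List.pairwise_cons.mpr ⟨?_, hp⟩
      intro z hz
      rcases List.mem_cons.mp hz with rfl | hz
      · exact Or.inl (by simp only [spKV]; exact_mod_cast hb)
      · exact spKLt_trans (Or.inl (by simp only [spKV]; exact_mod_cast hb)) (hy z hz)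
    · rename_i hb
      rw [decide_eq_true_iff] at hb
      refine List.pairwise_cons.mpr ⟨?_, ih hys (fun z hz => hidx z (List.mem_cons_of_mem _ hz))⟩
      intro z hz
      rcases (PySem.List.mem_insertBy _ _ _ _).mp hz with rfl | hz
      · have h1 : y.1 < z.1 := hidx y List.mem_cons_self
        have h2 : y.2.length ≤ z.2.length := Nat.le_of_not_lt (fun hh => hb hh)
        unfold spKLt spKV
        omega
      · exact hy z hz

theorem spFoldIns_pairwise (xs acc : List (Int × List Int))
    (hacc : acc.Pairwise (fun a b => spKLt (spKV a) (spKV b)))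
    (hsep : ∀ a ∈ acc, ∀ b ∈ xs, a.1 < b.1)
    (hxs : xs.Pairwise (fun a b => a.1 < b.1)) :
    (xs.foldl (fun acc x => PySem.List.insertBy (fun a b => decide (a.2.length < b.2.length)) x acc) acc).Pairwise
      (fun a b => spKLt (spKV a) (spKV b)) := by
  induction xs generalizing acc with
  | nil => exact hacc
  | cons x xs ih =>
    rcases List.pairwise_cons.mp hxs with ⟨hx, hxs'⟩
    refine ih _ (spInsertBy_pairwise x acc hacc
        (fun y hy => hsep y hy x List.mem_cons_self)) ?_ hxs'
    intro a ha b hb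
    rcases (PySem.List.mem_insertBy _ _ _ _).mp ha with rfl | ha
    · exact hx b hb
    · exact hsep a ha b (List.mem_cons_of_mem _ hb)

theorem spSorted_pairwise (xs : List (List Int)) :
    (PySem.List.sorted (PySem.List.enumerate xs) (fun x => x.2.length)).Pairwise
      (fun a b => spKLt (spKV a) (spKV b)) := by
  rw [PySem.List.sorted_eq_foldl_insertBy]
  exact spFoldIns_pairwise _ [] (by simp) (by simp) (PySem.List.pairwise_lt_enumerate xs 0)

-- ---- A's output slots: each original index is written exactly once ----

theorem spFoldSet_get (L : List (Int × List Int)) (hnd : (L.map Prod.fst).Nodup)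
    (hnn : ∀ x ∈ L, 0 ≤ x.1)
    (ps : List Nat) (hnodup : ps.Nodup) (hps : ∀ p ∈ ps, p < L.length)
    (out : List (Option (List Int))) (hout : out.length = L.length)
    (q p₀ : Nat) (hq : q < L.length) (hp₀ : p₀ < L.length) (hkey : L[p₀].1 = (q : Int)) :
    (ps.foldl (fun o i =>
        o.set ((PySem.List.pyGetD L (i : Int) (0, [])).1).toNat (spHandleOne L i)) out)[q]?
      = if p₀ ∈ ps then some (spHandleOne L p₀) else out[q]? := by
  induction ps generalizing out with
  | nil => simp
  | cons p ps ih =>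
    have hplt : p < L.length := hps p List.mem_cons_self
    have hpnotin : p ∉ ps := (List.nodup_cons.mp hnodup).1
    rw [List.foldl_cons, PySem.List.pyGetD_natCast, List.getD_eq_getElem L _ hplt]
    have hset_len : (out.set (L[p].1.toNat) (spHandleOne L p)).length = L.length := by
      rw [List.length_set]; exact hout
    by_cases hpp : p = p₀
    · subst hpp
      rw [ih (List.nodup_cons.mp hnodup).2 (fun r hr => hps r (List.mem_cons_of_mem _ hr))
        _ hset_len]
      rw [if_neg hpnotin, if_pos List.mem_cons_self]
      have : L[p].1.toNat = q := by rw [hkey]; exact Int.toNat_natCast q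
      rw [this]
      exact List.getElem?_set_self (by omega)
    · have hne : L[p].1.toNat ≠ q := by
        intro hc
        have h0 : 0 ≤ L[p].1 := hnn _ (List.getElem_mem hplt)
        have : L[p].1 = ((q : Nat) : Int) := by omega
        have : (L.map Prod.fst)[p]'(by simpa using hplt)
            = (L.map Prod.fst)[p₀]'(by simpa using hp₀) := by
          simp only [List.getElem_map]
          rw [this, hkey]
        exact hpp ((List.Nodup.getElem_inj_iff hnd).mp this)
      rw [ih (List.nodup_cons.mp hnodup).2 (fun r hr => hps r (List.mem_cons_of_mem _ hr))
        _ hset_len]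
      rw [List.getElem?_set_ne hne]
      have hmem : p₀ ∈ p :: ps ↔ p₀ ∈ ps := by
        constructor
        · intro h; rcases List.mem_cons.mp h with h | h
          · exact absurd h.symm hpp
          · exact h
        · exact List.mem_cons_of_mem _
      simp only [hmem]

-- ---- A's inner scan equals B's find_sub, mapped ----

theorem spMap_getD_range' (L : List (Int × List Int)) (d : Int × List Int) :
    ∀ (b a : Nat), a + b = L.length →
      (List.range' a b).map (fun (c : Nat) => PySem.List.pyGetD L (c : Int) d) = L.drop a := by
  intro b
  induction b with
  | zero =>
    intro a ha
    simp only [List.range'_zero, List.map_nil]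
    exact (List.drop_of_length_le (by omega)).symm
  | succ b ih =>
    intro a ha
    have haL : a < L.length := by omega
    rw [List.range'_succ, List.map_cons, PySem.List.pyGetD_natCast,
      List.getD_eq_getElem L _ haL, ih (a + 1) (by omega),
      List.drop_eq_getElem_cons haL]

theorem spInner_eq (p : Int × List Int) (s : List Int) (hs : s ≠ []) :
    (PySem.List.pyRange 0 ((p.2.length : Int) - (s.length : Int) + 1) 1).findSome? (fun st =>
        if PySem.List.pyGet? s 0 = PySem.List.pyGet? p.2 st ∧
            s = PySem.List.slice p.2 (some st) (some (st + (s.length : Int))) then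
          some [p.1, st, st + (s.length : Int)]
        else none)
      = (spFindSub p.2 s).map (fun k => [p.1, k, k + (s.length : Int)]) := by
  unfold spFindSub
  rw [← spFindSome_map]
  apply spFindSome_congr
  intro st hst
  have hst0 : 0 ≤ st := ((PySem.List.mem_pyRange_one).mp hst).1
  by_cases hb : PySem.List.slice p.2 (some st) (some (st + (s.length : Int))) = s
  · have hA : PySem.List.pyGet? s 0 = PySem.List.pyGet? p.2 st := by
      rw [PySem.List.pyGet?_zero, PySem.List.pyGet?_of_nonneg p.2 hst0]
      have hsl : s = List.take s.length (List.drop st.toNat p.2) := by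
        have hidx : ((st + (s.length : Int)).toNat - st.toNat) = s.length := by omega
        have h' := hb
        rw [PySem.List.slice_toNat p.2 hst0 (by omega), hidx] at h'
        exact h'.symm
      conv_lhs => rw [hsl]
      rw [List.getElem?_take, List.getElem?_drop]
      rcases s with _ | ⟨shd, stl⟩
      · exact absurd rfl hs
      · simp
    rw [if_pos ⟨hA, hb.symm⟩, if_pos hb]
    simp
  · rw [if_neg (fun hc => hb hc.2.symm), if_neg hb]
    simp

theorem spFoldSet_len (L : List (Int × List Int)) (ps : List Nat)
    (out : List (Option (List Int))) :
    (ps.foldl (fun o i =>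
        o.set ((PySem.List.pyGetD L (i : Int) (0, [])).1).toNat (spHandleOne L i)) out).length
      = out.length := by
  induction ps generalizing out with
  | nil => rfl
  | cons p ps ih => rw [List.foldl_cons, ih, List.length_set]


theorem spHandleOne_eq (L : List (Int × List Int)) (p₀ : Nat) (hp : p₀ < L.length)
    (hs : L[p₀].2 ≠ []) :
    spHandleOne L p₀
      = ((L.drop (p₀ + 1)).reverse.findSome?
            (fun p => (spFindSub p.2 L[p₀].2).map (fun k => (p, k)))).map
          (fun pk => [pk.1.1, pk.2, pk.2 + (L[p₀].2.length : Int)]) := by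
  simp only [spHandleOne]
  rw [PySem.List.pyGetD_natCast, List.getD_eq_getElem L _ hp]
  rw [List.range_eq_range', List.drop_range']
  have h1 : 0 + (p₀ + 1) * 1 = p₀ + 1 := by ring
  rw [h1]
  have h2 : (fun c : Nat =>
      (PySem.List.pyRange 0 ((((PySem.List.pyGetD L (c : Int) (0, [])).2.length : Int))
          - ((L[p₀].2.length : Int)) + 1) 1).findSome? (fun st =>
        if PySem.List.pyGet? L[p₀].2 0 = PySem.List.pyGet? (PySem.List.pyGetD L (c : Int) (0, [])).2 st ∧
            L[p₀].2 = PySem.List.slice (PySem.List.pyGetD L (c : Int) (0, [])).2 (some st)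
              (some (st + (L[p₀].2.length : Int))) then
          some [(PySem.List.pyGetD L (c : Int) (0, [])).1, st, st + (L[p₀].2.length : Int)]
        else none))
      = (fun p : Int × List Int =>
        (PySem.List.pyRange 0 (((p.2.length : Int)) - ((L[p₀].2.length : Int)) + 1) 1).findSome? (fun st =>
          if PySem.List.pyGet? L[p₀].2 0 = PySem.List.pyGet? p.2 st ∧
              L[p₀].2 = PySem.List.slice p.2 (some st) (some (st + (L[p₀].2.length : Int))) then
            some [p.1, st, st + (L[p₀].2.length : Int)]
          else none)) ∘ (fun (c : Nat) => PySem.List.pyGetD L (c : Int) (0, [])) := rfl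
  rw [h2, ← List.findSome?_map, List.map_reverse,
    spMap_getD_range' L (0, []) (L.length - (p₀ + 1)) (p₀ + 1) (by omega)]
  rw [← spFindSome_map]
  apply spFindSome_congr
  intro p hmem
  rw [spInner_eq p L[p₀].2 hs, Option.map_map]
  rfl

-- ---- B's fold over the sorted list ----

theorem spFold_skip (i : Int) (s : List Int) (ys : List (Int × List Int))
    (h : ∀ y ∈ ys, ¬ spKLt ((s.length : Int), i) (spKV y)) :
    ys.foldl (spStep i s) none = none := by
  induction ys with
  | nil => rfl
  | cons y ys ih =>
    have hy := h y List.mem_cons_self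
    have hcond : (y.2.length : Int) < (s.length : Int) ∨
        ((y.2.length : Int) = (s.length : Int) ∧ y.1 ≤ i) := by
      unfold spKLt spKV at hy; omega
    simp only [List.foldl_cons, spStep, if_pos hcond]
    exact ih (fun z hz => h z (List.mem_cons_of_mem _ hz))

theorem spFold_suffix (i : Int) (s : List Int) (ys : List (Int × List Int))
    (hp : ys.Pairwise (fun a b => spKLt (spKV a) (spKV b)))
    (hall : ∀ y ∈ ys, spKLt ((s.length : Int), i) (spKV y)) :
    ys.foldl (spStep i s) none
      = (ys.reverse.findSome? (fun p => (spFindSub p.2 s).map (fun k => (p, k)))).map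
          (fun pk => ((pk.1.2.length : Int), pk.1.1, pk.2)) := by
  induction ys using List.reverseRecOn with
  | nil => rfl
  | append_singleton zs y ih =>
    rw [List.foldl_append]
    rcases List.pairwise_append.mp hp with ⟨hzs, _, hsep⟩
    have hally : spKLt ((s.length : Int), i) (spKV y) := hall y (by simp)
    have hzs' : ∀ p ∈ zs, spKLt (spKV p) (spKV y) := fun p hp' => hsep p hp' y (by simp)
    rw [ih hzs (fun p hp' => hall p (List.mem_append_left _ hp'))]
    rw [List.reverse_append, List.reverse_singleton, List.singleton_append,
      List.findSome?_cons]
    cases hfy : spFindSub y.2 s with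
    | none =>
      simp only [List.foldl_cons, List.foldl_nil, Option.map_none]
      unfold spStep
      split_ifs <;> simp [hfy]
    | some k =>
      simp only [List.foldl_cons, List.foldl_nil, Option.map_some]
      unfold spStep
      have hc1 : ¬((y.2.length : Int) < (s.length : Int) ∨
          ((y.2.length : Int) = (s.length : Int) ∧ y.1 ≤ i)) := by
        unfold spKLt spKV at hally; omega
      rw [if_neg hc1]
      cases hB : (zs.reverse.findSome? (fun p => (spFindSub p.2 s).map fun k => (p, k))) with
      | none => simp [spWorse, hfy]
      | some pk =>
        obtain ⟨p, hpmem, hpeq⟩ := List.exists_of_findSome?_eq_some hB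
        have hpzs : p ∈ zs := List.mem_reverse.mp hpmem
        have hp1 : pk.1 = p := by
          cases hfs : spFindSub p.2 s with
          | none => rw [hfs] at hpeq; simp at hpeq
          | some kq => rw [hfs] at hpeq; simp only [Option.map_some, Option.some.injEq] at hpeq; rw [← hpeq]
        have hklt := hzs' p hpzs
        have hw : spWorse (some ((pk.1.2.length : Int), pk.1.1, pk.2)) (y.2.length : Int) y.1
            = false := by
          simp only [spWorse, decide_eq_false_iff_not]
          rw [hp1]
          unfold spKLt spKV at hklt
          omega
        simp only [Option.map_some]
        rw [hw]
        simp only [Bool.false_eq_true, if_false, hfy]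

-- ---- B's fold does not depend on the traversal order (distinct (length, index) keys) ----

theorem spStep_comm_lt (i : Int) (s : List Int) (x y : Int × List Int)
    (hlt : spKLt (spKV x) (spKV y)) (z : Option (Int × Int × Int)) :
    spStep i s (spStep i s z x) y = spStep i s (spStep i s z y) x := by
  rcases x with ⟨xj, xt⟩; rcases y with ⟨yj, yt⟩
  unfold spKLt spKV at hlt
  simp only at hlt
  unfold spStep spWorse
  by_cases hcx : (xt.length : Int) < (s.length : Int) ∨
      ((xt.length : Int) = (s.length : Int) ∧ xj ≤ i) <;>
    by_cases hcy : (yt.length : Int) < (s.length : Int) ∨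
        ((yt.length : Int) = (s.length : Int) ∧ yj ≤ i) <;>
      cases hfx : spFindSub xt s <;> cases hfy : spFindSub yt s <;>
        rcases z with _ | ⟨bl, bj, bk⟩ <;>
          simp only [hcx, hcy, if_pos, if_neg,
            not_false_iff, decide_eq_true_iff, Bool.false_eq_true] <;>
            split_ifs <;> simp_all <;> omega

theorem spStep_comm (i : Int) (s : List Int) (x y : Int × List Int)
    (hne : spKV x ≠ spKV y) (z : Option (Int × Int × Int)) :
    spStep i s (spStep i s z x) y = spStep i s (spStep i s z y) x := by
  rcases spKLt_total hne with h | h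
  · exact spStep_comm_lt i s x y h z
  · exact (spStep_comm_lt i s y x h z).symm

-- ===== VERDICT (by name: the statement is the Claim_ definition above) =====
theorem subseq_pack_spec : Claim_equal_subseq_pack := by
  intro subseqs _ hpre
  unfold Spec_subseq_pack
  simp only [subseq_pack, subseq_pack_alt]
  have hpair := spSorted_pairwise subseqs
  have hperm := PySem.List.sorted_perm (PySem.List.enumerate subseqs)
    (fun x => x.2.length) false
  set E := PySem.List.enumerate subseqs with hE
  set L := PySem.List.sorted E (fun x => x.2.length) with hLdef
  have hlenE : E.length = subseqs.length := PySem.List.length_enumerate subseqs 0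
  have hlenL : L.length = subseqs.length := by
    rw [hLdef, PySem.List.length_sorted, hlenE]
  have hnn : ∀ x ∈ L, 0 ≤ x.1 := by
    intro x hx
    rcases (PySem.List.mem_enumerate_iff subseqs 0 x).mp (hperm.mem_iff.mp hx) with ⟨k, hk, rfl⟩
    simp
  have hnd : (L.map Prod.fst).Nodup := by
    have h1 : (E.map Prod.fst).Pairwise (· < ·) :=
      List.pairwise_map.mpr (PySem.List.pairwise_lt_enumerate subseqs 0)
    exact ((hperm.map Prod.fst).nodup_iff).mpr (h1.imp ne_of_lt)
  apply List.ext_getElem?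
  intro q
  have hlenA : (((List.range L.length).foldl (fun out (i : Nat) =>
      out.set ((PySem.List.pyGetD L (i : Int) (0, [])).1).toNat (spHandleOne L i))
      (List.replicate L.length none))).length = subseqs.length := by
    rw [spFoldSet_len, List.length_replicate, hlenL]
  by_cases hq : q < subseqs.length
  · -- B side value
    rw [List.getElem?_map,
      List.getElem?_eq_getElem (by rw [hlenE]; exact hq : q < E.length),
      PySem.List.getElem_enumerate subseqs 0 q
        (by rw [PySem.List.length_enumerate]; exact hq)]
    simp only [Option.map_some, zero_add]
    set s := subseqs[q] with hsdef
    -- the position of (q, s) in the sorted list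
    have hmemE : ((q : Int), s) ∈ E := by
      rw [hE, PySem.List.mem_enumerate_iff]
      exact ⟨q, hq, by simp [hsdef]⟩
    obtain ⟨p₀, hp₀, hLp⟩ := List.getElem_of_mem (hperm.mem_iff.mpr hmemE)
    -- A side value
    have hA := spFoldSet_get L hnd hnn (List.range L.length) List.nodup_range
      (fun p hp => List.mem_range.mp hp) (List.replicate L.length none)
      (by rw [List.length_replicate]) q p₀ (by omega) hp₀ (by rw [hLp])
    rw [if_pos (List.mem_range.mpr hp₀)] at hA
    rw [hA]
    -- B's fold over E equals the fold over the sorted list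
    have hcomm : ∀ x ∈ E, ∀ y ∈ E, ∀ z,
        spStep (q : Int) s (spStep (q : Int) s z x) y
          = spStep (q : Int) s (spStep (q : Int) s z y) x := by
      intro x hx y hy z
      by_cases hxy : x = y
      · subst hxy; rfl
      · refine spStep_comm _ _ _ _ (fun hkv => hxy ?_) z
        rcases (PySem.List.mem_enumerate_iff subseqs 0 x).mp hx with ⟨kx, hkx, rfl⟩
        rcases (PySem.List.mem_enumerate_iff subseqs 0 y).mp hy with ⟨ky, hky, rfl⟩
        have : kx = ky := by
          have := congrArg Prod.snd hkv
          simp only [spKV] at this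
          omega
        subst this
        rfl
    have hfold : E.foldl (spStep (q : Int) s) none = L.foldl (spStep (q : Int) s) none :=
      hperm.symm.foldl_eq' hcomm none
    rw [hfold]
    -- split the sorted list at p₀
    have hsplit : L.take (p₀ + 1) ++ L.drop (p₀ + 1) = L := List.take_append_drop _ _
    have hskip : ∀ y ∈ L.take (p₀ + 1), ¬ spKLt ((s.length : Int), (q : Int)) (spKV y) := by
      intro y hy
      rw [List.mem_take_iff_getElem] at hy
      obtain ⟨r, hr, hry⟩ := hy
      have hkv₀ : spKV L[p₀] = ((s.length : Int), (q : Int)) := by rw [hLp]; rfl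
      rcases Nat.lt_or_ge r p₀ with hlt | hge
      · have := (List.pairwise_iff_getElem.mp hpair) r p₀ (by omega) hp₀ hlt
        rw [hry, hkv₀] at this
        exact fun hc => spKLt_asymm this hc
      · have : r = p₀ := by omega
        subst this
        rw [hry] at hkv₀
        rw [hkv₀]
        unfold spKLt
        omega
    have hfold2 : L.foldl (spStep (q : Int) s) none
        = (L.drop (p₀ + 1)).foldl (spStep (q : Int) s) none := by
      conv_lhs => rw [← hsplit]
      rw [List.foldl_append, spFold_skip _ _ _ hskip]
    rw [hfold2]
    by_cases hdrop : L.drop (p₀ + 1) = []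
    · -- no longer candidates at all
      have hnil : (List.range L.length).drop (p₀ + 1) = [] := by
        rw [List.drop_eq_nil_iff]
        rw [List.drop_eq_nil_iff] at hdrop
        simpa using hdrop
      have hnone : spHandleOne L p₀ = none := by
        simp only [spHandleOne, hnil, List.reverse_nil, List.findSome?_nil]
      rw [hdrop, hnone]
      rfl
    · -- there is at least one longer candidate, so s ≠ []
      have hn2 : p₀ + 1 < L.length := by
        by_contra hc
        exact hdrop (List.drop_eq_nil_iff.mpr (by omega))
      have hs : s ≠ [] := by
        intro hnil
        have : ([] : List Int) ∈ subseqs := by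
          rw [← hnil, hsdef]
          exact List.getElem_mem hq
        have := hpre this
        omega
      have hs' : L[p₀].2 ≠ [] := by rw [hLp]; exact hs
      rw [spFold_suffix (q : Int) s (L.drop (p₀ + 1)) (hpair.drop)
        (by
          intro y hy
          rw [List.mem_drop_iff_getElem] at hy
          obtain ⟨j, hj, hjy⟩ := hy
          have := (List.pairwise_iff_getElem.mp hpair) p₀ (p₀ + 1 + j) hp₀ (by omega)
            (by omega)
          rw [hjy] at this
          have hkv₀ : spKV L[p₀] = ((s.length : Int), (q : Int)) := by rw [hLp]; rfl
          rw [hkv₀] at this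
          exact this)]
      rw [spHandleOne_eq L p₀ hp₀ hs']
      have hLp2 : L[p₀].2 = s := by rw [hLp]
      rw [hLp2]
      cases hraw : (L.drop (p₀ + 1)).reverse.findSome?
          (fun p => (spFindSub p.2 s).map (fun k => (p, k))) with
      | none => rfl
      | some pk => rfl
  · -- out of range on both sides
    rw [List.getElem?_eq_none (by rw [hlenA]; omega),
      List.getElem?_eq_none (by rw [List.length_map, hlenE]; omega)]
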